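-- pv_equiv track=rewrite | github.com/jjf012/subdomain | subdomain.py | __generate_general_dicts
-- ===== SOURCE A (Python) =====
-- import itertools
-- import string
--
-- def __generate_general_dicts(line):
--     subnames = []
--     letter_count = line.count('{letter}')
--     number_count = line.count('{number}')
--     letters = itertools.product(string.ascii_lowercase, repeat=letter_count)
--     letters = [''.join(l) for l in letters]
--     numbers = itertools.product(string.digits, repeat=number_count)
--     numbers = [''.join(n) for n in numbers]
--     for l in letters:
--         iter_line = line.replace('{letter}' * letter_count, l)
--         subnames.append(iter_line)
--     number_dicts = []
--     for gd in subnames: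
--         for n in numbers:
--             iter_line = gd.replace('{number}' * number_count, n)
--             number_dicts.append(iter_line)
--     if len(number_dicts) > 0:
--         return number_dicts
--     else:
--         return subnames
-- ===== SOURCE B (Python) =====
-- import string
--
-- def __generate_general_dicts(line):
--     # Arithmetic unranking: one flat index k over range(26**lc * 10**nc),
--     # decoded by repeated divmod into the letter word and the digit word.
--     def _decode(i, count, pool):
--         s = ''
--         for _ in range(count):
--             i, r = divmod(i, len(pool))
--             s = pool[r] + s
--         return s
--     lc = line.count('{letter}')
--     nc = line.count('{number}')
--     lblock = '{letter}' * lc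
--     nblock = '{number}' * nc
--     L = 26 ** lc
--     N = 10 ** nc
--     return [line.replace(lblock, _decode(k // N, lc, string.ascii_lowercase))
--                 .replace(nblock, _decode(k % N, nc, string.digits))
--             for k in range(L * N)]
-- ===== Notes on version B (the rewrite author's own statement) =====
-- stated objective: alternative
-- what changed: Replaced itertools.product enumeration plus A's two-phase build (subnames, then nested loop with an unreachable empty fallback) by arithmetic unranking: a single flat loop over range(26**lc * 10**nc) whose index is decoded by repeated divmod into the letter word and the digit word.
import Mathlib
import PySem

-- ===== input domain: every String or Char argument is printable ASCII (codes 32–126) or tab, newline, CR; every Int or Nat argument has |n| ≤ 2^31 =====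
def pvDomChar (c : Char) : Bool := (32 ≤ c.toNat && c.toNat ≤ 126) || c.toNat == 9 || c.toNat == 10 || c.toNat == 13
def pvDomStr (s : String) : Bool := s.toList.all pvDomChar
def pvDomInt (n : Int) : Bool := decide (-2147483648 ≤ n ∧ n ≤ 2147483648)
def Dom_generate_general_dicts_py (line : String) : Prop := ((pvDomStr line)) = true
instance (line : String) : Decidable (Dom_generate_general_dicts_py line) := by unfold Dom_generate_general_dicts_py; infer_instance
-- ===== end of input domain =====

-- B replaces A's itertools.product enumeration and two-phase build by arithmetic unranking of a
-- single flat index (repeated divmod); return value only, same outputs; not faster, alternative.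

-- itertools.product(pool, repeat=k): tuples as List Char, leftmost position varies slowest (Python order)
def pvProduct (pool : List Char) : Nat → List (List Char)
  | 0 => [[]]
  | n + 1 => pool.flatMap (fun c => (pvProduct pool n).map (fun t => c :: t))

-- Python 's * k' for nonnegative k
def pvRepeatStr (s : String) : Nat → String
  | 0 => ""
  | n + 1 => String.ofList (s.toList ++ (pvRepeatStr s n).toList)

def pvLowercase : List Char := "abcdefghijklmnopqrstuvwxyz".toList
def pvDigits : List Char := "0123456789".toList

-- ===== PORT A =====
def generate_general_dicts_py (line : String) : List String :=
  let letter_count := PySem.Str.count line "{letter}"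
  let number_count := PySem.Str.count line "{number}"
  let letters := (pvProduct pvLowercase letter_count).map (fun l => String.ofList l)
  let numbers := (pvProduct pvDigits number_count).map (fun n => String.ofList n)
  let subnames := letters.foldl
    (fun acc l => acc ++ [PySem.Str.replace line (pvRepeatStr "{letter}" letter_count) l]) []
  let number_dicts := subnames.foldl
    (fun acc gd => numbers.foldl
      (fun acc2 n => acc2 ++ [PySem.Str.replace gd (pvRepeatStr "{number}" number_count) n]) acc) []
  if number_dicts.length > 0 then number_dicts else subnames

-- ===== PORT B =====
-- Source B's _decode loop: 'for _ in range(count): i, r = divmod(i, len(pool)); s = pool[r] + s'.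
-- k, i, r are nonnegative Python ints throughout, so Nat division/modulo are exact here;
-- pool[r] with r = i % len(pool) < len(pool) is always in range, so getD is exact.
def pvDecodeLoop (pool : List Char) : Nat → Nat → List Char → List Char
  | 0, _, s => s
  | k + 1, i, s => pvDecodeLoop pool k (i / pool.length) (pool.getD (i % pool.length) ' ' :: s)

def generate_general_dicts_py_alt (line : String) : List String :=
  let lc := PySem.Str.count line "{letter}"
  let nc := PySem.Str.count line "{number}"
  let lblock := pvRepeatStr "{letter}" lc
  let nblock := pvRepeatStr "{number}" nc
  let L := 26 ^ lc
  let N := 10 ^ nc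
  (List.range (L * N)).map (fun k =>
    PySem.Str.replace
      (PySem.Str.replace line lblock (String.ofList (pvDecodeLoop pvLowercase lc (k / N) [])))
      nblock (String.ofList (pvDecodeLoop pvDigits nc (k % N) [])))

-- ===== PRECONDITION & SPEC =====
def Spec_generate_general_dicts_py (line : String) (out : List String) : Prop := out = generate_general_dicts_py_alt line
instance (line : String) (out : List String) : Decidable (Spec_generate_general_dicts_py line out) := by unfold Spec_generate_general_dicts_py; infer_instance

-- ===== CLAIM (what is proved, stated in full; the proofs are below) =====
def Claim_equal_generate_general_dicts_py : Prop := ∀ (line : String), Dom_generate_general_dicts_py line → Spec_generate_general_dicts_py line (generate_general_dicts_py line)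

-- ===== LEMMAS AND PROOFS =====

theorem pvProduct_ne_nil (pool : List Char) (hp : pool ≠ []) : ∀ n, pvProduct pool n ≠ [] := by
  intro n
  induction n with
  | zero => simp [pvProduct]
  | succ n ih =>
    obtain ⟨c, cs, rfl⟩ := List.exists_cons_of_ne_nil hp
    intro h
    rw [pvProduct, List.flatMap_cons, List.append_eq_nil_iff, List.map_eq_nil_iff] at h
    exact ih h.1

-- accumulator invariant for the decode loop
theorem pvDecodeLoop_append (pool : List Char) :
    ∀ (k i : Nat) (s : List Char), pvDecodeLoop pool k i s = pvDecodeLoop pool k i [] ++ s := by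
  intro k
  induction k with
  | zero => intro i s; simp [pvDecodeLoop]
  | succ k ih =>
    intro i s
    rw [pvDecodeLoop, pvDecodeLoop, ih, ih (i / pool.length) [_]]
    simp

-- itertools.product order: last position varies fastest
theorem pvProduct_snoc (pool : List Char) (n : Nat) :
    pvProduct pool (n + 1) = (pvProduct pool n).flatMap (fun t => pool.map (fun c => t ++ [c])) := by
  induction n with
  | zero =>
    simp only [pvProduct]
    induction pool with
    | nil => rfl
    | cons c cs ih => simp_all
  | succ n ih =>
    have h2 : pvProduct pool (n + 1 + 1)
        = pool.flatMap (fun c => (pvProduct pool (n + 1)).map (fun t => c :: t)) := by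
      simp [pvProduct]
    have h3 : pvProduct pool (n + 1)
        = pool.flatMap (fun c => (pvProduct pool n).map (fun t => c :: t)) := by
      simp [pvProduct]
    conv_lhs => rw [h2, ih]
    conv_rhs => rw [h3]
    simp [List.map_flatMap, List.flatMap_map, List.flatMap_assoc, Function.comp_def]

-- range (m * p) as a two-level enumeration
theorem range_mul_eq (m p : Nat) :
    List.range (m * p) = (List.range m).flatMap (fun q => (List.range p).map (fun r => q * p + r)) := by
  induction m with
  | zero => simp
  | succ m ih =>
    rw [Nat.succ_mul, List.range_add, ih, List.range_succ, List.flatMap_append]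
    simp [Nat.add_comm]

-- decoding every flat index in order reproduces itertools.product
theorem decode_range_eq_product (pool : List Char) (n : Nat) :
    (List.range (pool.length ^ n)).map (fun i => pvDecodeLoop pool n i []) = pvProduct pool n := by
  induction n with
  | zero => simp [pvDecodeLoop, pvProduct]
  | succ n ih =>
    rw [pow_succ, range_mul_eq, List.map_flatMap, pvProduct_snoc, ← ih, List.flatMap_map]
    apply List.flatMap_congr
    intro q _
    apply List.ext_getElem
    · simp
    · intro i h1 h2
      simp only [List.getElem_map, List.getElem_range]
      have hi : i < pool.length := by simpa using h2
      have hlen : 0 < pool.length := Nat.lt_of_le_of_lt (Nat.zero_le i) hi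
      have hdiv : (q * pool.length + i) / pool.length = q := by
        rw [Nat.mul_comm, Nat.mul_add_div hlen, Nat.div_eq_of_lt hi, Nat.add_zero]
      have hmod : (q * pool.length + i) % pool.length = i := by
        rw [Nat.mul_comm, Nat.mul_add_mod, Nat.mod_eq_of_lt hi]
      show pvDecodeLoop pool (n + 1) (q * pool.length + i) [] = _
      rw [pvDecodeLoop, hdiv, hmod, pvDecodeLoop_append]
      simp [List.getD_eq_getElem?_getD, List.getElem?_eq_getElem hi]

theorem generate_general_dicts_py_eq (line : String) :
    generate_general_dicts_py line = generate_general_dicts_py_alt line := by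
  unfold generate_general_dicts_py generate_general_dicts_py_alt
  simp only [PySem.List.foldl_append_singleton_eq_map, PySem.List.foldl_append_eq_flatMap,
    List.nil_append, List.flatMap_map, List.map_map, Function.comp_def]
  have hL : (26 : Nat) = pvLowercase.length := by decide
  have hN : (10 : Nat) = pvDigits.length := by decide
  rw [hL, hN, range_mul_eq, List.map_flatMap]
  have hB : ∀ lc nc : Nat,
      (List.range (pvLowercase.length ^ lc)).flatMap (fun q =>
        ((List.range (pvDigits.length ^ nc)).map (fun r => q * pvDigits.length ^ nc + r)).map
          (fun k =>
            PySem.Str.replace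
              (PySem.Str.replace line (pvRepeatStr "{letter}" lc)
                (String.ofList (pvDecodeLoop pvLowercase lc (k / pvDigits.length ^ nc) [])))
              (pvRepeatStr "{number}" nc)
              (String.ofList (pvDecodeLoop pvDigits nc (k % pvDigits.length ^ nc) [])))) =
      (pvProduct pvLowercase lc).flatMap (fun l =>
        (pvProduct pvDigits nc).map (fun n =>
          PySem.Str.replace
            (PySem.Str.replace line (pvRepeatStr "{letter}" lc) (String.ofList l))
            (pvRepeatStr "{number}" nc) (String.ofList n))) := by
    intro lc nc
    rw [← decode_range_eq_product pvLowercase lc, ← decode_range_eq_product pvDigits nc,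
      List.flatMap_map]
    apply List.flatMap_congr
    intro q _
    rw [List.map_map, List.map_map]
    apply List.map_congr_left
    intro r hr
    rw [List.mem_range] at hr
    have hpos : 0 < pvDigits.length ^ nc := pow_pos (by decide) nc
    have hdiv : (q * pvDigits.length ^ nc + r) / pvDigits.length ^ nc = q := by
      rw [Nat.mul_comm, Nat.mul_add_div hpos, Nat.div_eq_of_lt hr, Nat.add_zero]
    have hmod : (q * pvDigits.length ^ nc + r) % pvDigits.length ^ nc = r := by
      rw [Nat.mul_comm, Nat.mul_add_mod, Nat.mod_eq_of_lt hr]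
    simp only [Function.comp_def]
    rw [hdiv, hmod]
  rw [hB]
  split_ifs with h
  · rfl
  · exfalso
    have hLne := pvProduct_ne_nil pvLowercase (by decide) (PySem.Str.count line "{letter}")
    have hNne := pvProduct_ne_nil pvDigits (by decide) (PySem.Str.count line "{number}")
    simp only [gt_iff_lt, List.length_pos_iff, ne_eq, not_not, List.flatMap_eq_nil_iff,
      List.map_eq_nil_iff] at h
    obtain ⟨l0, _, hl0⟩ := List.exists_cons_of_ne_nil hLne
    exact hNne (h l0 (by rw [hl0]; exact List.mem_cons_self ..))

-- ===== VERDICT (by name: the statement is the Claim_ definition above) =====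
theorem generate_general_dicts_py_spec : Claim_equal_generate_general_dicts_py := by
  intro line _
  unfold Spec_generate_general_dicts_py
  exact generate_general_dicts_py_eq line
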